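-- pv_equiv track=rewrite | github.com/pypi-data/pypi-mirror-399 | packages/lupin-sw-ut-report/lupin_sw_ut_report-1.0.9.tar.gz/lupin_sw_ut_report-1.0.9/src/sw_ut_report/parse_txt_file.py | _create_segments
-- ===== SOURCE A (Python) =====
-- from typing import List, Tuple
--
-- def _create_segments(lines: List[str]) -> List[List[str]]:
--     """Create UnitTestCaseData segments from file lines."""
--     segments = []
--     current_segment = []
--     i = 0
--
--     while i < len(lines):
--         line = lines[i].strip()
--
--         # Check if this line is followed by "Covers:" (if not at the end)
--         if i < len(lines) - 1:
--             next_line = lines[i + 1].strip().lower()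
--         else:
--             next_line = ""
--
--         # Start a new UnitTestCaseData segment if line is not empty and followed by "Covers:"
--         if line and next_line.startswith("covers:"):
--             if current_segment:
--                 segments.append(current_segment)
--             current_segment = [line, lines[i + 1].strip()]
--             i += 2  # Skip both the scenario line and the covers line
--         elif current_segment:
--             # Add lines to current segment
--             current_segment.append(line)
--             i += 1
--         else:
--             i += 1
--
--     # Add last segment if it exists
--     if current_segment:
--         segments.append(current_segment)
--
--     return segments
-- ===== SOURCE B (Python) =====
-- def _create_segments(lines):
--     """Create UnitTestCaseData segments from file lines (two-phase: find starts, then slice)."""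
--     n = len(lines)
--     starts = []
--     i = 0
--     while i < n:
--         if lines[i].strip() and i + 1 < n and lines[i + 1].strip().lower().startswith("covers:"):
--             starts.append(i)
--             i += 2
--         else:
--             i += 1
--     segments = []
--     for j, s in enumerate(starts):
--         e = starts[j + 1] if j + 1 < len(starts) else n
--         segments.append([l.strip() for l in lines[s:e]])
--     return segments
-- ===== Notes on version B (the rewrite author's own statement) =====
-- stated objective: alternative
-- what changed: Replaces A's single stateful loop carrying a growing current segment with a two-phase decomposition: one scan that only records segment-start indices (replicating the skip-by-2), then a second pass that builds each segment by slicing between consecutive starts.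
import Mathlib
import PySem

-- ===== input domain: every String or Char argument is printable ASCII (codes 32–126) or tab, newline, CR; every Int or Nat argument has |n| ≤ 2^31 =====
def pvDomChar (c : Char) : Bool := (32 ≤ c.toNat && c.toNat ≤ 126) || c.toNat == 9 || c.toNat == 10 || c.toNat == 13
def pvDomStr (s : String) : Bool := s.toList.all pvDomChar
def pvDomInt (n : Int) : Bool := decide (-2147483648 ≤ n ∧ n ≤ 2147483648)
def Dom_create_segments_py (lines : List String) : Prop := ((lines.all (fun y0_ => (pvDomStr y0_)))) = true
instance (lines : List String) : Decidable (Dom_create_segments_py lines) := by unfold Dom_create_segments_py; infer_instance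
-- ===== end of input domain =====

-- B re-decomposes A's stateful loop into two phases (collect start indices, then slice); same result, same cost.

-- ===== PORT A =====
-- literal port of A's while loop; `lines.getD i ""` evaluates lines[i], which is always
-- in range where the Python reads it (i < len, and lines[i+1] only behind the covers-check).
def createSegLoopA (lines : List String) (segments : List (List String)) (cur : List String) (i : Nat) :
    List (List String) :=
  if _h : i < lines.length then
    let line := PySem.Str.strip (lines.getD i "")
    let next_line := if i < lines.length - 1 then PySem.Str.lower (PySem.Str.strip (lines.getD (i+1) "")) else ""
    if line != "" && PySem.Str.startswith next_line "covers:" then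
      createSegLoopA lines (if cur ≠ [] then segments ++ [cur] else segments)
        [line, PySem.Str.strip (lines.getD (i+1) "")] (i+2)
    else if cur ≠ [] then
      createSegLoopA lines segments (cur ++ [line]) (i+1)
    else
      createSegLoopA lines segments cur (i+1)
  else
    if cur ≠ [] then segments ++ [cur] else segments
termination_by lines.length - i

def create_segments_py (lines : List String) : List (List String) :=
  createSegLoopA lines [] [] 0

-- ===== PORT B =====
-- phase 1: the start-index scan of Source B (short-circuit condition, skip by 2 on a match)
def isStartB (lines : List String) (i : Nat) : Bool :=
  PySem.Str.strip (lines.getD i "") != "" && decide (i + 1 < lines.length) &&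
    PySem.Str.startswith (PySem.Str.lower (PySem.Str.strip (lines.getD (i+1) ""))) "covers:"

def startsB (lines : List String) (i : Nat) : List Nat :=
  if i < lines.length then
    if isStartB lines i then i :: startsB lines (i+2) else startsB lines (i+1)
  else []
termination_by lines.length - i

-- phase 2: for each start s, slice up to the next start (or end of file) and strip each line
def segsB (lines : List String) : List Nat → List (List String)
  | [] => []
  | s :: rest =>
      (PySem.List.slice lines (some (s : Int)) (some ((rest.head?.getD lines.length : Nat) : Int))).map
        PySem.Str.strip :: segsB lines rest

def create_segments_py_alt (lines : List String) : List (List String) :=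
  segsB lines (startsB lines 0)

-- ===== PRECONDITION & SPEC =====
def Spec_create_segments_py (lines : List String) (out : List (List String)) : Prop := out = create_segments_py_alt lines
instance (lines : List String) (out : List (List String)) : Decidable (Spec_create_segments_py lines out) := by unfold Spec_create_segments_py; infer_instance

-- ===== CLAIM (what is proved, stated in full; the proofs are below) =====
def Claim_equal_create_segments_py : Prop := ∀ (lines : List String), Dom_create_segments_py lines → Spec_create_segments_py lines (create_segments_py lines)

-- ===== LEMMAS AND PROOFS =====

-- stripped slice lines[i:e], drop/take form
def chunk (lines : List String) (i e : Nat) : List String :=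
  ((lines.drop i).take (e - i)).map PySem.Str.strip

theorem segsB_cons (lines : List String) (s : Nat) (rest : List Nat) :
    segsB lines (s :: rest) = chunk lines s (rest.head?.getD lines.length) :: segsB lines rest := by
  simp [segsB, chunk, PySem.List.slice_natCast]

theorem startsB_lb (lines : List String) :
    ∀ n i, lines.length - i ≤ n → ∀ j ∈ startsB lines i, i ≤ j := by
  intro n
  induction n with
  | zero =>
      intro i h j hj
      rw [startsB] at hj
      have : ¬ i < lines.length := by omega
      simp [this] at hj
  | succ n ih =>
      intro i h j hj
      rw [startsB] at hj
      by_cases hi : i < lines.length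
      · simp only [hi, if_true] at hj
        by_cases hs : isStartB lines i = true
        · simp only [hs, if_true, List.mem_cons] at hj
          rcases hj with rfl | hj
          · exact le_refl _
          · have := ih (i+2) (by omega) j hj; omega
        · simp only [hs] at hj
          have := ih (i+1) (by omega) j hj; omega
      · simp [hi] at hj

theorem headEnd_ge (lines : List String) (i : Nat) (h : i ≤ lines.length) :
    i ≤ (startsB lines i).head?.getD lines.length := by
  cases hs : startsB lines i with
  | nil => simpa using h
  | cons j rest =>
      have hj : j ∈ startsB lines i := by rw [hs]; exact List.mem_cons_self
      simpa using startsB_lb lines (lines.length - i) i (le_refl _) j hj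

theorem chunk_cons (lines : List String) (i e : Nat) (hi : i < lines.length) (he : i + 1 ≤ e) :
    chunk lines i e = PySem.Str.strip (lines.getD i "") :: chunk lines (i+1) e := by
  unfold chunk
  rw [List.drop_eq_getElem_cons hi]
  have : e - i = (e - (i+1)) + 1 := by omega
  rw [this, List.take_succ_cons, List.map_cons]
  congr 1
  simp [List.getD, List.getElem?_eq_getElem hi]

theorem loopA_eq (lines : List String) :
    ∀ n i segs cur, lines.length - i ≤ n →
      createSegLoopA lines segs cur i =
        segs ++ (if cur = [] then segsB lines (startsB lines i)
                 else (cur ++ chunk lines i ((startsB lines i).head?.getD lines.length))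
                   :: segsB lines (startsB lines i)) := by
  intro n
  induction n with
  | zero =>
      intro i segs cur h
      have hi : ¬ i < lines.length := by omega
      rw [createSegLoopA, startsB]
      simp only [hi, dite_false, if_false]
      by_cases hc : cur = []
      · simp [hc, segsB]
      · simp [hc, segsB, chunk, List.drop_eq_nil_of_le (by omega : lines.length ≤ i)]
  | succ n ih =>
      intro i segs cur h
      by_cases hi : i < lines.length
      · rw [createSegLoopA, startsB]
        simp only [hi, dite_true, if_true]
        have hcond : (PySem.Str.strip (lines.getD i "") != "" &&
            PySem.Str.startswith (if i < lines.length - 1 then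
              PySem.Str.lower (PySem.Str.strip (lines.getD (i+1) "")) else "") "covers:")
            = isStartB lines i := by
          unfold isStartB
          by_cases h1 : i < lines.length - 1
          · have h1' : i + 1 < lines.length := by omega
            simp [h1, h1']
          · have h1' : ¬ i + 1 < lines.length := by omega
            simp only [h1, h1', if_false, decide_false, Bool.and_false, Bool.false_and]
            simp
            intro _
            decide
        rw [hcond]
        by_cases hs : isStartB lines i = true
        · -- a new segment starts at i
          have h1 : i + 1 < lines.length := by
            unfold isStartB at hs
            by_cases h' : i + 1 < lines.length
            · exact h'
            · simp [h'] at hs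
          simp only [hs, if_true]
          rw [ih (i+2) _ _ (by omega)]
          have hnil : ([PySem.Str.strip (lines.getD i ""), PySem.Str.strip (lines.getD (i+1) "")] :
              List String) ≠ [] := by simp
          simp only [hnil]
          have he2 : i + 2 ≤ (startsB lines (i+2)).head?.getD lines.length :=
            headEnd_ge lines (i+2) (by omega)
          have hchunk : chunk lines i ((startsB lines (i+2)).head?.getD lines.length)
              = PySem.Str.strip (lines.getD i "") :: PySem.Str.strip (lines.getD (i+1) "")
                :: chunk lines (i+2) ((startsB lines (i+2)).head?.getD lines.length) := by
            rw [chunk_cons lines i _ hi (by omega), chunk_cons lines (i+1) _ h1 (by omega)]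
          by_cases hc : cur = []
          · subst hc
            simp only [ne_eq, not_true_eq_false, if_false]
            rw [segsB_cons]
            simp [hchunk]
          · simp only [if_pos hc, if_neg hc]
            rw [segsB_cons]
            simp only [List.head?_cons, Option.getD_some]
            have : chunk lines i i = [] := by simp [chunk]
            simp [this, hchunk, List.append_assoc]
        · -- no segment starts at i
          simp only [hs, if_false, Bool.false_eq_true]
          by_cases hc : cur = []
          · subst hc
            simp only [ne_eq, not_true_eq_false, if_false]
            rw [ih (i+1) _ _ (by omega)]
            simp
          · simp only [ne_eq, hc, not_false_eq_true, if_true]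
            rw [ih (i+1) _ _ (by omega)]
            simp only [if_neg (by simp : ¬ (cur ++ [PySem.Str.strip (lines.getD i "")]) = [])]
            rw [chunk_cons lines i _ hi (headEnd_ge lines (i+1) (by omega))]
            simp [List.append_assoc]
      · have := ih i segs cur (by omega)
        rw [createSegLoopA, startsB]
        simp only [hi, dite_false, if_false]
        by_cases hc : cur = []
        · simp [hc, segsB]
        · simp [hc, segsB, chunk, List.drop_eq_nil_of_le (by omega : lines.length ≤ i)]

-- ===== VERDICT (by name: the statement is the Claim_ definition above) =====
theorem create_segments_py_spec : Claim_equal_create_segments_py := by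
  intro lines _
  unfold Spec_create_segments_py create_segments_py create_segments_py_alt
  rw [loopA_eq lines lines.length 0 [] [] (by omega)]
  simp
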